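-- pv_equiv track=rewrite | github.com/AlexO28/leet_code_problems | smallest_missing_nonnegative_integer_after_operations.py | findSmallestInteger
-- ===== SOURCE A (Python) =====
-- from typing import List
--
-- def findSmallestInteger(nums: List[int], value: int) -> int:
--     freq_dict = {}
--     for num in nums:
--         num_mod = num % value
--         if num_mod in freq_dict:
--             freq_dict[num_mod] += 1
--         else:
--             freq_dict[num_mod] = 1
--     num = 0
--     while True:
--         num_mod = num % value
--         if num_mod in freq_dict:
--             if freq_dict[num_mod] == 1:
--                 del freq_dict[num_mod]
--             else:
--                 freq_dict[num_mod] -= 1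
--             num += 1
--         else:
--             return num
-- ===== SOURCE B (Python) =====
-- def findSmallestInteger(nums, value):
--     m = abs(value)
--     counts = {}
--     for x in nums:
--         r = x % m
--         counts[r] = counts.get(r, 0) + 1
--     best = m * counts.get(0, 0)
--     for r in range(1, m):
--         if r >= best:
--             break
--         cand = r + m * counts.get(r, 0)
--         if cand < best:
--             best = cand
--     return best
-- ===== Notes on version B (the rewrite author's own statement) =====
-- stated objective: alternative
-- what changed: A simulates counting up num=0,1,2,... against a decrementing residue-frequency dict; B builds the residue counter once and computes the answer in closed form as the minimum of r + |value|*count[r] over residue classes, scanning residues with an early break once r exceeds the current best.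
import Mathlib
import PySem

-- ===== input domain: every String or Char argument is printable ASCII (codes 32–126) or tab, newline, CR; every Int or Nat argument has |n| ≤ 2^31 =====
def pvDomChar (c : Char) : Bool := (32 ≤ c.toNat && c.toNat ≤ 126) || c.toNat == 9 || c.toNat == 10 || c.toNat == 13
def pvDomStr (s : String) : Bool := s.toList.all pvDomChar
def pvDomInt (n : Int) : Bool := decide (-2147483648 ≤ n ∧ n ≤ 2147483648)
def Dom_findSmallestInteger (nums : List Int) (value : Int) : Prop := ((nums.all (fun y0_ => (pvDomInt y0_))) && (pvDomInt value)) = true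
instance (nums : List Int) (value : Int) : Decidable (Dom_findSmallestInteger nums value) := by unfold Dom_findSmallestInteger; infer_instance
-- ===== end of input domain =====

-- B replaces A's count-up simulation by a closed-form minimum of r + |value|*count[r] over residue classes r (a different, bounded second pass; same cost).

-- ===== PORT A =====
def pvBuildA (nums : List Int) (value : Int) : PySem.Dict Int Int :=
  nums.foldl (fun d num =>
    let num_mod := PySem.Int.mod num value
    if d.contains num_mod then d.modify num_mod 0 (fun c => c + 1)
    else d.insert num_mod 1) PySem.Dict.empty

def pvLoopA (value : Int) : Nat → PySem.Dict Int Int → Int → Int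
  | 0, _, num => num
  | fuel + 1, d, num =>
    let num_mod := PySem.Int.mod num value
    match d.get? num_mod with
    | some c =>
        pvLoopA value fuel (if c = 1 then d.erase num_mod else d.modify num_mod 0 (fun x => x - 1)) (num + 1)
    | none => num

def findSmallestInteger (nums : List Int) (value : Int) : Int :=
  pvLoopA value (value.natAbs * nums.length + 1) (pvBuildA nums value) 0

def pvBuildB (nums : List Int) (m : Int) : PySem.Dict Int Int :=
  nums.foldl (fun d x => d.insert (PySem.Int.mod x m) (d.getD (PySem.Int.mod x m) 0 + 1)) PySem.Dict.empty

def pvLoopB (counts : PySem.Dict Int Int) (m : Int) : Nat → Int → Int → Int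
  | 0, _, best => best
  | k + 1, r, best =>
    if best ≤ r then best
    else
      let cand := r + m * counts.getD r 0
      pvLoopB counts m k (r + 1) (if cand < best then cand else best)

def findSmallestInteger_alt (nums : List Int) (value : Int) : Int :=
  let m : Int := (value.natAbs : Int)
  let counts := pvBuildB nums m
  let best := m * counts.getD 0 0
  pvLoopB counts m (value.natAbs - 1) 1 best

-- ===== PRECONDITION & SPEC =====
-- Pre_ excludes exactly value = 0, where the Python A raises ZeroDivisionError at 'num % value'.
def Pre_findSmallestInteger (_nums : List Int) (value : Int) : Prop := value ≠ 0
instance (nums : List Int) (value : Int) : Decidable (Pre_findSmallestInteger nums value) := by unfold Pre_findSmallestInteger; infer_instance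

def pvWitness_findSmallestInteger : List Int × Int := ([2, -4, 1, 7], 3)

def Spec_findSmallestInteger (nums : List Int) (value : Int) (out : Int) : Prop := out = findSmallestInteger_alt nums value
instance (nums : List Int) (value : Int) (out : Int) : Decidable (Spec_findSmallestInteger nums value out) := by unfold Spec_findSmallestInteger; infer_instance

-- ===== CLAIM (what is proved, stated in full; the proofs are below) =====
def Claim_equal_findSmallestInteger : Prop := ∀ (nums : List Int) (value : Int), Dom_findSmallestInteger nums value → Pre_findSmallestInteger nums value → Spec_findSmallestInteger nums value (findSmallestInteger nums value)

-- ===== LEMMAS AND PROOFS =====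

def pvM (value : Int) : Int := (value.natAbs : Int)

def pvInv (d : PySem.Dict Int Int) (g : Int → Int) : Prop :=
  ∀ k, d.get? k = if g k ≤ 0 then none else some (g k)

def pvCand (value : Int) (g : Int → Int) (num : Int) (r : Nat) : Int :=
  (num + ((r : Int) - num) % pvM value) + pvM value * g (PySem.Int.mod (r : Int) value)

def pvMinC (value : Int) (g : Int → Int) (num : Int) : Int :=
  ((List.range value.natAbs).map (pvCand value g num)).foldl min (pvCand value g num 0)

lemma pv_mod_eq_iff (x y b : Int) (hb : b ≠ 0) :
    PySem.Int.mod x b = PySem.Int.mod y b ↔ b ∣ (x - y) := by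
  have hx := PySem.Int.floordiv_mul_add_mod x b
  have hy := PySem.Int.floordiv_mul_add_mod y b
  constructor
  · intro h
    exact ⟨PySem.Int.floordiv x b - PySem.Int.floordiv y b, by ring_nf; linarith [hx, hy, h]⟩
  · rintro ⟨c, hc⟩
    have hd : PySem.Int.mod x b - PySem.Int.mod y b
        = b * (c - PySem.Int.floordiv x b + PySem.Int.floordiv y b) := by ring_nf; linarith [hx, hy, hc]
    rcases lt_or_gt_of_ne hb with hneg | hpos
    · have b1 := PySem.Int.mod_neg_bounds x hneg
      have b2 := PySem.Int.mod_neg_bounds y hneg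
      have he : c - PySem.Int.floordiv x b + PySem.Int.floordiv y b = 0 := by
        by_contra hne
        rcases lt_or_gt_of_ne hne with h1 | h1
        · nlinarith [b1.1, b1.2, b2.1, b2.2]
        · nlinarith [b1.1, b1.2, b2.1, b2.2]
      rw [he, mul_zero] at hd; linarith
    · have b11 := PySem.Int.mod_nonneg x hpos
      have b12 := PySem.Int.mod_lt x hpos
      have b21 := PySem.Int.mod_nonneg y hpos
      have b22 := PySem.Int.mod_lt y hpos
      have he : c - PySem.Int.floordiv x b + PySem.Int.floordiv y b = 0 := by
        by_contra hne
        rcases lt_or_gt_of_ne hne with h1 | h1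
        · nlinarith
        · nlinarith
      rw [he, mul_zero] at hd; linarith

-- Python-mod agrees at the divisor and at its absolute value
lemma pv_modM_eq (x y value : Int) (hv : value ≠ 0) :
    (PySem.Int.mod x value = PySem.Int.mod y value) ↔ (PySem.Int.mod x (pvM value) = PySem.Int.mod y (pvM value)) := by
  have hM : (pvM value) ≠ 0 := by
    unfold pvM; simp; exact hv
  rw [pv_mod_eq_iff x y value hv, pv_mod_eq_iff x y (pvM value) hM]
  unfold pvM
  exact (Int.natAbs_dvd).symm

lemma pv_emod_sub_one (M a : Int) (hM : 0 < M) :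
    (a - 1) % M = if a % M = 0 then M - 1 else a % M - 1 := by
  have h0 : 0 ≤ a % M := Int.emod_nonneg a (by omega)
  have h1 : a % M < M := Int.emod_lt_of_pos a hM
  have hdiv : M * (a / M) + a % M = a := Int.ediv_add_emod a M
  split_ifs with h
  · have he : a - 1 = (M - 1) + M * (a / M - 1) := by rw [mul_sub, mul_one]; linarith
    rw [he, Int.add_mul_emod_self_left, Int.emod_eq_of_lt (by omega) (by omega)]
  · have he : a - 1 = (a % M - 1) + M * (a / M) := by linarith
    rw [he, Int.add_mul_emod_self_left, Int.emod_eq_of_lt (by omega) (by omega)]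

lemma pvM_pos (value : Int) (hv : value ≠ 0) : 0 < pvM value := by
  unfold pvM; exact_mod_cast Int.natAbs_pos.mpr hv

lemma pvCand_ge (value : Int) (hv : value ≠ 0) (g : Int → Int) (hg : ∀ k, 0 ≤ g k)
    (num : Int) (r : Nat) : num ≤ pvCand value g num r := by
  have hM := pvM_pos value hv
  have h1 : 0 ≤ ((r : Int) - num) % pvM value := Int.emod_nonneg _ (by omega)
  have h2 : 0 ≤ pvM value * g (PySem.Int.mod (r : Int) value) :=
    mul_nonneg (by omega) (hg _)
  unfold pvCand; linarith

lemma pv_foldl_min_ge (l : List Int) (a b : Int) (ha : b ≤ a) (hl : ∀ x ∈ l, b ≤ x) :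
    b ≤ l.foldl min a := by
  rcases PySem.List.foldl_min_mem l a with h | h
  · omega
  · exact hl _ h

lemma pvMinC_of_zero (value : Int) (hv : value ≠ 0) (g : Int → Int) (hg : ∀ k, 0 ≤ g k)
    (num : Int) (h0 : g (PySem.Int.mod num value) = 0) :
    pvMinC value g num = num := by
  have hM := pvM_pos value hv
  have he0 : 0 ≤ num % pvM value := Int.emod_nonneg num (by omega)
  have he1 : num % pvM value < pvM value := Int.emod_lt_of_pos num hM
  set rs : Nat := (num % pvM value).toNat with hrs
  have hcast : ((rs : Int)) = num % pvM value := Int.toNat_of_nonneg he0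
  have hrlt : rs < value.natAbs := by
    have : (rs : Int) < (value.natAbs : Int) := by rw [hcast]; exact he1
    exact_mod_cast this
  have hdvd : value ∣ ((rs : Int) - num) := by
    rw [hcast]
    have : num % pvM value - num = -(pvM value * (num / pvM value)) := by
      have := Int.ediv_add_emod num (pvM value); linarith
    rw [this]
    exact dvd_neg.mpr (Dvd.dvd.mul_right (Int.dvd_natAbs.mpr dvd_rfl) _)
  have hmodeq : PySem.Int.mod (rs : Int) value = PySem.Int.mod num value :=
    (pv_mod_eq_iff _ _ _ hv).mpr hdvd
  have hcands : pvCand value g num rs = num := by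
    unfold pvCand
    rw [hmodeq, h0, mul_zero, add_zero, hcast]
    rw [Int.sub_emod, Int.emod_emod_of_dvd num dvd_rfl, sub_self, Int.zero_emod, add_zero]
  have hle : ((List.range value.natAbs).map (pvCand value g num)).foldl min (pvCand value g num 0) ≤ num := by
    have hmem : pvCand value g num rs ∈ (List.range value.natAbs).map (pvCand value g num) :=
      List.mem_map_of_mem (List.mem_range.mpr hrlt)
    have := (PySem.List.foldl_min_le ((List.range value.natAbs).map (pvCand value g num)) (pvCand value g num 0)).2 _ hmem
    omega
  have hge : num ≤ ((List.range value.natAbs).map (pvCand value g num)).foldl min (pvCand value g num 0) := by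
    apply pv_foldl_min_ge
    · exact pvCand_ge value hv g hg num 0
    · intro x hx
      obtain ⟨r, _, rfl⟩ := List.mem_map.mp hx
      exact pvCand_ge value hv g hg num r
  unfold pvMinC
  omega

lemma pvCand_step (value : Int) (hv : value ≠ 0) (g : Int → Int) (num : Int) (r : Nat) :
    pvCand value (fun k => if k = PySem.Int.mod num value then g k - 1 else g k) (num + 1) r
      = pvCand value g num r := by
  have hM := pvM_pos value hv
  unfold pvCand
  have hsub : ((r : Int)) - (num + 1) = ((r : Int) - num) - 1 := by ring
  rw [hsub, pv_emod_sub_one (pvM value) ((r : Int) - num) hM]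
  by_cases h : PySem.Int.mod (r : Int) value = PySem.Int.mod num value
  · have hdvd : pvM value ∣ ((r : Int) - num) := by
      unfold pvM
      exact Int.natAbs_dvd.mpr ((pv_mod_eq_iff _ _ _ hv).mp h)
    have hz : ((r : Int) - num) % pvM value = 0 := Int.emod_eq_zero_of_dvd hdvd
    rw [if_pos hz, h]
    beta_reduce
    rw [if_pos rfl, hz]
    ring
  · have hnz : ((r : Int) - num) % pvM value ≠ 0 := by
      intro hz
      exact h ((pv_mod_eq_iff _ _ _ hv).mpr (Int.natAbs_dvd.mp (Int.dvd_of_emod_eq_zero hz)))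
    rw [if_neg hnz]
    beta_reduce
    rw [if_neg h]
    ring

lemma pvMinC_step (value : Int) (hv : value ≠ 0) (g : Int → Int) (num : Int) :
    pvMinC value (fun k => if k = PySem.Int.mod num value then g k - 1 else g k) (num + 1)
      = pvMinC value g num := by
  unfold pvMinC
  rw [pvCand_step value hv g num 0,
      List.map_congr_left (fun r _ => pvCand_step value hv g num r)]



lemma pv_get?_erase (d : PySem.Dict Int Int) (k k' : Int) :
    (d.erase k).get? k' = if k' = k then none else d.get? k' := by
  obtain ⟨items⟩ := d
  simp only [PySem.Dict.erase, PySem.Dict.get?]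
  induction items with
  | nil => simp
  | cons p t ih =>
      rw [List.filter_cons]
      by_cases h1 : p.1 = k
      · have hb : (!(p.1 == k)) = false := by simp [h1]
        rw [hb, if_neg (by simp)]
        rw [ih]
        by_cases h2 : k' = k
        · simp [h2]
        · have hb2 : (p.1 == k') = false := by simp [h1]; omega
          simp only [if_neg h2]
          rw [List.find?_cons, hb2]
      · have hb : (!(p.1 == k)) = true := by simp [h1]
        rw [hb, if_pos rfl]
        by_cases h2 : p.1 = k'
        · have hk : ¬ (k' = k) := by rw [← h2]; exact fun h => h1 h
          have hb2 : (p.1 == k') = true := by simp [h2]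
          rw [List.find?_cons, hb2, List.find?_cons, hb2, if_neg hk]
        · have hb2 : (p.1 == k') = false := by simp [h2]
          rw [List.find?_cons, hb2, List.find?_cons, hb2, ih]

lemma pvInv_congr (d : PySem.Dict Int Int) (g g' : Int → Int) (h : pvInv d g)
    (hgg : ∀ k, g k = g' k) : pvInv d g' := by
  intro k; rw [← hgg k]; exact h k

lemma pv_getD_of_inv (d : PySem.Dict Int Int) (g : Int → Int) (h : pvInv d g)
    (hg : ∀ k, 0 ≤ g k) (k : Int) : d.getD k 0 = g k := by
  rw [PySem.Dict.getD_eq_get?_getD, h k]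
  by_cases hz : g k ≤ 0
  · rw [if_pos hz]; have := hg k; simp; omega
  · rw [if_neg hz]; rfl

lemma pvStepA_inv (value : Int) (d : PySem.Dict Int Int) (g : Int → Int)
    (hI : pvInv d g) (hn : ∀ k, 0 ≤ g k) (x : Int) :
    pvInv (if d.contains (PySem.Int.mod x value) then d.modify (PySem.Int.mod x value) 0 (fun c => c + 1)
           else d.insert (PySem.Int.mod x value) 1)
      (fun k => g k + if PySem.Int.mod x value = k then 1 else 0) := by
  set K := PySem.Int.mod x value with hK
  intro k
  beta_reduce
  by_cases hc : d.contains K = true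
  · have hKpos : 0 < g K := by
      rw [PySem.Dict.contains_eq_isSome_get?, hI K] at hc
      by_contra hle
      rw [if_pos (by omega)] at hc
      simp at hc
    rw [if_pos hc]
    simp only [PySem.Dict.modify]
    rw [PySem.Dict.get?_insert, pv_getD_of_inv d g hI hn K]
    by_cases hk : k = K
    · have e1 : (if K = k then (1 : Int) else 0) = 1 := if_pos hk.symm
      rw [if_pos hk, e1, hk, if_neg (by omega)]
    · have e0 : (if K = k then (1 : Int) else 0) = 0 := if_neg (fun h => hk h.symm)
      rw [if_neg hk, e0, add_zero, hI k]
  · have hK0 : g K = 0 := by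
      have hnone : d.get? K = none := by
        rw [PySem.Dict.contains_eq_isSome_get?] at hc
        cases hg : d.get? K
        · rfl
        · rw [hg] at hc; simp at hc
      rw [hI K] at hnone
      by_cases hz : g K ≤ 0
      · have := hn K; omega
      · rw [if_neg hz] at hnone; simp at hnone
    rw [if_neg hc, PySem.Dict.get?_insert]
    by_cases hk : k = K
    · have e1 : (if K = k then (1 : Int) else 0) = 1 := if_pos hk.symm
      rw [if_pos hk, e1, hk, hK0, if_neg (by omega)]
      norm_num
    · have e0 : (if K = k then (1 : Int) else 0) = 0 := if_neg (fun h => hk h.symm)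
      rw [if_neg hk, e0, add_zero, hI k]

lemma pvBuildA_aux (value : Int) (xs : List Int) : ∀ (d : PySem.Dict Int Int) (g : Int → Int),
    pvInv d g → (∀ k, 0 ≤ g k) →
    pvInv (xs.foldl (fun d num =>
      let num_mod := PySem.Int.mod num value
      if d.contains num_mod then d.modify num_mod 0 (fun c => c + 1)
      else d.insert num_mod 1) d)
      (fun k => g k + (xs.countP (fun x => PySem.Int.mod x value == k) : Int)) := by
  induction xs with
  | nil =>
      intro d g hI hn
      exact pvInv_congr d g _ hI (by intro k; simp)
  | cons x xs ih =>
      intro d g hI hn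
      rw [List.foldl_cons]
      refine pvInv_congr _ _ _
        (ih _ (fun k => g k + if PySem.Int.mod x value = k then 1 else 0)
          (pvStepA_inv value d g hI hn x)
          (by intro k; have := hn k; beta_reduce; split_ifs <;> omega)) ?_
      intro k
      rw [List.countP_cons]
      push_cast
      by_cases h : PySem.Int.mod x value = k
      · rw [if_pos h, if_pos (by simp [h])]; ring
      · rw [if_neg h, if_neg (by simp [h])]; ring

lemma pvBuildA_inv (nums : List Int) (value : Int) :
    pvInv (pvBuildA nums value) (fun k => (nums.countP (fun x => PySem.Int.mod x value == k) : Int)) := by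
  have := pvBuildA_aux value nums PySem.Dict.empty (fun _ => 0)
    (by intro k; simp [PySem.Dict.get?_empty]) (by intro k; simp)
  exact pvInv_congr _ _ _ this (by intro k; simp)

lemma pvLoopA_eq (value : Int) (hv : value ≠ 0) : ∀ (fuel : Nat) (d : PySem.Dict Int Int)
    (g : Int → Int) (num : Int), 0 ≤ num → pvInv d g → (∀ k, 0 ≤ g k) →
    pvLoopA value fuel d num = min (pvMinC value g num) (num + (fuel : Int)) := by
  intro fuel
  induction fuel with
  | zero =>
      intro d g num h0 hI hn
      have hge : num ≤ pvMinC value g num := by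
        unfold pvMinC
        apply pv_foldl_min_ge
        · exact pvCand_ge value hv g hn num 0
        · intro y hy
          obtain ⟨r, _, rfl⟩ := List.mem_map.mp hy
          exact pvCand_ge value hv g hn num r
      rw [pvLoopA]
      push_cast
      omega
  | succ fuel ih =>
      intro d g num h0 hI hn
      rw [pvLoopA]
      by_cases hz : g (PySem.Int.mod num value) ≤ 0
      · rw [hI (PySem.Int.mod num value), if_pos hz]
        dsimp only
        have h00 : g (PySem.Int.mod num value) = 0 := le_antisymm hz (hn _)
        rw [pvMinC_of_zero value hv g hn num h00]
        push_cast
        omega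
      · rw [hI (PySem.Int.mod num value), if_neg hz]
        dsimp only
        have hpos : 0 < g (PySem.Int.mod num value) := by omega
        set K := PySem.Int.mod num value with hK
        set g' : Int → Int := fun k => if k = K then g k - 1 else g k with hg'
        have hI' : pvInv (if g K = 1 then d.erase K else d.modify K 0 (fun x => x - 1)) g' := by
          by_cases h1 : g K = 1
          · rw [if_pos h1]
            intro k
            rw [pv_get?_erase]
            by_cases hk : k = K
            · have hgk : g' k = 0 := by simp [hg', hk, h1]
              rw [if_pos hk, hgk]
              simp
            · have hgk : g' k = g k := by simp [hg', hk]
              rw [if_neg hk, hgk, hI k]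
          · rw [if_neg h1]
            intro k
            simp only [PySem.Dict.modify]
            rw [PySem.Dict.get?_insert, pv_getD_of_inv d g hI hn K]
            by_cases hk : k = K
            · have hgk : g' k = g K - 1 := by simp [hg', hk]
              rw [if_pos hk, hgk, if_neg (by omega)]
            · have hgk : g' k = g k := by simp [hg', hk]
              rw [if_neg hk, hgk, hI k]
        have hn' : ∀ k, 0 ≤ g' k := by
          intro k
          have := hn k
          simp only [hg']
          split_ifs with h
          · rw [h]; omega
          · omega
        rw [ih _ g' (num + 1) (by omega) hI' hn', hg', hK,
          pvMinC_step value hv g num]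
        push_cast
        omega



lemma pvBuildB_getD (nums : List Int) (m : Int) (r : Int) :
    (pvBuildB nums m).getD r 0 = (nums.countP (fun x => PySem.Int.mod x m == r) : Int) := by
  unfold pvBuildB
  rw [← List.foldl_map (f := fun x => PySem.Int.mod x m) (g := fun (d : PySem.Dict Int Int) r => d.insert r (d.getD r 0 + 1)),
    PySem.Dict.getD_foldl_insert_add_one, PySem.Dict.getD_empty]
  simp [List.count, List.countP_map]
  rfl

lemma pvLoopB_eq (counts : PySem.Dict Int Int) (m : Int)
    (hm : ∀ i : Int, 0 ≤ m * counts.getD i 0) :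
    ∀ (k : Nat) (r best : Int),
    pvLoopB counts m k r best
      = ((List.range k).map (fun (j : Nat) => (r + (j : Int)) + m * counts.getD (r + (j : Int)) 0)).foldl min best := by
  intro k
  induction k with
  | zero => intro r best; rw [pvLoopB]; simp
  | succ k ih =>
      intro r best
      rw [pvLoopB]
      by_cases hbr : best ≤ r
      · rw [if_pos hbr]
        have hge : best ≤ ((List.range (k + 1)).map
            (fun (j : Nat) => (r + (j : Int)) + m * counts.getD (r + (j : Int)) 0)).foldl min best := by
          apply pv_foldl_min_ge _ _ _ le_rfl
          intro y hy
          obtain ⟨j, _, rfl⟩ := List.mem_map.mp hy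
          have := hm (r + (j : Int))
          have hj : (0 : Int) ≤ (j : Int) := Int.natCast_nonneg j
          omega
        have hle := (PySem.List.foldl_min_le ((List.range (k + 1)).map
            (fun (j : Nat) => (r + (j : Int)) + m * counts.getD (r + (j : Int)) 0)) best).1
        omega
      · rw [if_neg hbr]
        dsimp only
        rw [ih]
        rw [List.range_succ_eq_map, List.map_cons, List.map_map, List.foldl_cons]
        have e0 : (r + ((0 : Nat) : Int)) + m * counts.getD (r + ((0 : Nat) : Int)) 0
            = r + m * counts.getD r 0 := by norm_num
        rw [e0]
        have e1 : (min best (r + m * counts.getD r 0))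
            = (if r + m * counts.getD r 0 < best then r + m * counts.getD r 0 else best) := by
          split_ifs <;> omega
        rw [← e1]
        congr 1
        apply List.map_congr_left
        intro j _
        simp only [Function.comp]
        push_cast
        ring_nf



theorem pv_main (nums : List Int) (value : Int) (hv : value ≠ 0) :
    findSmallestInteger nums value = findSmallestInteger_alt nums value := by
  have hM : 0 < pvM value := pvM_pos value hv
  have hMA : pvM value = (value.natAbs : Int) := rfl
  set g0 : Int → Int := fun k => ((nums.countP (fun x => PySem.Int.mod x value == k) : Nat) : Int) with hg0
  have hn : ∀ k, 0 ≤ g0 k := by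
    intro k; simp only [hg0]; exact_mod_cast Nat.zero_le _
  have hI : pvInv (pvBuildA nums value) g0 := pvBuildA_inv nums value
  have hcnt : ∀ i : Int, (pvBuildB nums ((value.natAbs : Int))).getD i 0
      = ((nums.countP (fun x => PySem.Int.mod x ((value.natAbs : Int)) == i) : Nat) : Int) :=
    fun i => pvBuildB_getD nums _ i
  have hm : ∀ i : Int, 0 ≤ ((value.natAbs : Int)) * (pvBuildB nums ((value.natAbs : Int))).getD i 0 := by
    intro i
    apply mul_nonneg (by positivity)
    rw [hcnt i]
    positivity
  have hc : ∀ r ∈ List.range value.natAbs, pvCand value g0 0 r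
      = (fun (r : Nat) => ((r : Int)) + ((value.natAbs : Int)) * (pvBuildB nums ((value.natAbs : Int))).getD ((r : Int)) 0) r := by
    intro r hr
    have hrlt : ((r : Int)) < (value.natAbs : Int) := by
      exact_mod_cast List.mem_range.mp hr
    have hrM : PySem.Int.mod (r : Int) (pvM value) = (r : Int) := by
      rw [PySem.Int.mod_eq_emod_of_pos hM, hMA]
      exact Int.emod_eq_of_lt (by positivity) hrlt
    have hcong : ∀ x ∈ nums,
        (PySem.Int.mod x value == PySem.Int.mod (r : Int) value)
          = (PySem.Int.mod x ((value.natAbs : Int)) == (r : Int)) := by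
      intro x _
      rw [Bool.eq_iff_iff, beq_iff_eq, beq_iff_eq]
      have h2 := pv_modM_eq x (r : Int) value hv
      rw [hrM] at h2
      rw [show ((value.natAbs : Int)) = pvM value from rfl]
      exact h2
    unfold pvCand
    beta_reduce
    rw [hcnt, sub_zero, hMA]
    rw [Int.emod_eq_of_lt (by positivity) hrlt]
    rw [zero_add, hg0]
    beta_reduce
    rw [List.countP_congr (fun x hx => by rw [hcong x hx])]
  have h0mem : 0 ∈ List.range value.natAbs := by
    exact List.mem_range.mpr (Int.natAbs_pos.mpr hv)
  have hbound : pvMinC value g0 0 ≤ (value.natAbs : Int) * (nums.length : Int) := by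
    have hinit := (PySem.List.foldl_min_le
      ((List.range value.natAbs).map (pvCand value g0 0)) (pvCand value g0 0 0)).1
    have hval : pvCand value g0 0 0 ≤ (value.natAbs : Int) * (nums.length : Int) := by
      rw [hc 0 h0mem]
      beta_reduce
      have hle : ((nums.countP (fun x => PySem.Int.mod x ((value.natAbs : Int)) == ((0 : Nat) : Int)) : Nat) : Int)
          ≤ (nums.length : Int) := by exact_mod_cast List.countP_le_length
      have hmul := mul_le_mul_of_nonneg_left hle (by positivity : (0 : Int) ≤ (value.natAbs : Int))
      rw [hcnt]
      push_cast
      push_cast at hmul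
      omega
    unfold pvMinC
    omega
  unfold findSmallestInteger
  rw [pvLoopA_eq value hv _ _ g0 0 le_rfl hI hn]
  have hminA : min (pvMinC value g0 0) (0 + ((value.natAbs * nums.length + 1 : Nat) : Int))
      = pvMinC value g0 0 := by
    push_cast
    push_cast at hbound
    omega
  rw [hminA]
  show pvMinC value g0 0 = pvLoopB (pvBuildB nums ((value.natAbs : Int))) ((value.natAbs : Int))
    (value.natAbs - 1) 1 (((value.natAbs : Int)) * (pvBuildB nums ((value.natAbs : Int))).getD 0 0)
  rw [pvLoopB_eq _ _ hm]
  unfold pvMinC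
  rw [List.map_congr_left hc]
  rw [show List.range value.natAbs = List.range ((value.natAbs - 1) + 1) from by
      rw [Nat.sub_add_cancel (by omega : 1 ≤ value.natAbs)]]
  rw [List.range_succ_eq_map, List.map_cons, List.map_map, List.foldl_cons]
  rw [hc 0 h0mem]
  beta_reduce
  have einit : (((0 : Nat) : Int)) + ((value.natAbs : Int)) * (pvBuildB nums ((value.natAbs : Int))).getD (((0 : Nat) : Int)) 0
      = ((value.natAbs : Int)) * (pvBuildB nums ((value.natAbs : Int))).getD 0 0 := by norm_num
  rw [einit, min_self]
  congr 1
  apply List.map_congr_left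
  intro j _
  simp only [Function.comp]
  have ej : ((Nat.succ j : Nat) : Int) = 1 + (j : Int) := by push_cast; ring
  rw [ej]

-- ===== VERDICT (by name: the statement is the Claim_ definition above) =====
theorem findSmallestInteger_spec : Claim_equal_findSmallestInteger := by
  intro nums value _ hpre
  unfold Spec_findSmallestInteger
  exact pv_main nums value hpre
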